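-- pv_equiv track=rewrite | github.com/Sthesha/supervised_surface_segmentation | segmentation-models/seq2seq_segmentation_models/crf_based_models/evaluator.py | _convert_predictions
-- ===== SOURCE A (Python) =====
-- def _convert_predictions(Y_pred, test_tokens, test_segments):
--     """Convert BMES predictions to segmented format"""
--     predictions = []
--     for token, pred_labels in zip(test_tokens, Y_pred):
--         segmented = []
--         for char, label in zip(token, pred_labels):
--             segmented.append(char)
--             if label in ['E', 'S']:
--                 segmented.append('-')
--         pred_segmented = ''.join(segmented).rstrip('-')
--         predictions.append(pred_segmented)
--
--     return predictions, list(test_segments.values())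
-- ===== SOURCE B (Python) =====
-- def _convert_predictions(Y_pred, test_tokens, test_segments):
--     """Convert BMES predictions to segmented format.
--
--     Boundary-index algorithm: first compute the cut positions from the labels
--     alone, then slice the token at those boundaries and join the slices with
--     '-'; no per-character accumulation."""
--     predictions = []
--     for token, pred_labels in zip(test_tokens, Y_pred):
--         n = min(len(token), len(pred_labels))
--         cuts = [i + 1 for i in range(n) if pred_labels[i] in ('E', 'S')]
--         bounds = [0] + cuts + [n]
--         pieces = [token[a:b] for a, b in zip(bounds, bounds[1:])]
--         predictions.append('-'.join(pieces).rstrip('-'))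
--     return predictions, list(test_segments.values())
-- ===== Notes on version B (the rewrite author's own statement) =====
-- stated objective: alternative
-- what changed: Replaces A's streaming per-character accumulation with inline '-' insertion by a boundary-index algorithm: compute the cut positions from the labels alone, slice the token at those boundaries, and '-'.join the slices (then rstrip('-') as before).
import Mathlib
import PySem

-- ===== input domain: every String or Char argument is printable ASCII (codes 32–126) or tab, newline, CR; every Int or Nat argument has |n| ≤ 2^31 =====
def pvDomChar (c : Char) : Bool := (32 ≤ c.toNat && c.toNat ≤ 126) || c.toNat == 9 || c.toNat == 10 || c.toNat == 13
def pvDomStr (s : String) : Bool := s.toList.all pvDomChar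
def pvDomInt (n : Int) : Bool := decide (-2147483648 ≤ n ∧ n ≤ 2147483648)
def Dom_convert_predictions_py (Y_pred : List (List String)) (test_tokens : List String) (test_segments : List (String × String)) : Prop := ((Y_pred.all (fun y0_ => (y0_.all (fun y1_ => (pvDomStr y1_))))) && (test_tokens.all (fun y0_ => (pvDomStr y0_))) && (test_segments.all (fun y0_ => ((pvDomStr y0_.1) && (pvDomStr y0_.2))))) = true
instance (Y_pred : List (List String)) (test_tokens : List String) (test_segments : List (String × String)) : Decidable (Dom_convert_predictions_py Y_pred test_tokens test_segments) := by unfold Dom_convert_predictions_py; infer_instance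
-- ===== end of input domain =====

-- B replaces A's streaming per-char accumulation (inline '-' insertion) by a boundary-index
-- algorithm: cut positions are computed from the labels, the token is sliced at those
-- boundaries and the slices are joined with '-' (then rstrip('-') as in A); same cost.

-- hand port of Python's s.rstrip('-') on the char list: drop trailing '-' characters (exact: a
-- single strip character, so rstrip('-') removes exactly the maximal trailing run of '-')
def pyRstripDash (cs : List Char) : List Char := (cs.reverse.dropWhile (· == '-')).reverse

-- ===== PORT A =====
def convert_predictions_py (Y_pred : List (List String)) (test_tokens : List String) (test_segments : List (String × String)) : List String × List String :=
  let predictions := (test_tokens.zip Y_pred).foldl (fun preds tp =>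
    let segmented := (tp.1.toList.zip tp.2).foldl (fun seg cl =>
      let seg' := seg ++ [cl.1]
      if cl.2 == "E" || cl.2 == "S" then seg' ++ ['-'] else seg') []
    preds ++ [String.ofList (pyRstripDash segmented)]) []
  (predictions, (PySem.Dict.ofList test_segments).values)

-- ===== PORT B =====
-- pred_labels[i] is read with getD: every index i of the comprehension satisfies i < n ≤ len(pred_labels), so it is exact
def convert_predictions_py_alt (Y_pred : List (List String)) (test_tokens : List String) (test_segments : List (String × String)) : List String × List String :=
  let predictions := (test_tokens.zip Y_pred).foldl (fun preds tp =>
    let cs := tp.1.toList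
    let n := min cs.length tp.2.length
    let cuts := ((List.range n).filter (fun i => tp.2.getD i "" == "E" || tp.2.getD i "" == "S")).map (fun i => i + 1)
    let bounds := 0 :: (cuts ++ [n])
    let pieces := (bounds.zip bounds.tail).map (fun ab => (cs.drop ab.1).take (ab.2 - ab.1))
    preds ++ [String.ofList (pyRstripDash (PySem.Chars.join ['-'] pieces))]) []
  (predictions, (PySem.Dict.ofList test_segments).values)

-- ===== PRECONDITION & SPEC =====
def Spec_convert_predictions_py (Y_pred : List (List String)) (test_tokens : List String) (test_segments : List (String × String)) (out : List String × List String) : Prop := out = convert_predictions_py_alt Y_pred test_tokens test_segments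
instance (Y_pred : List (List String)) (test_tokens : List String) (test_segments : List (String × String)) (out : List String × List String) : Decidable (Spec_convert_predictions_py Y_pred test_tokens test_segments out) := by unfold Spec_convert_predictions_py; infer_instance

-- ===== CLAIM (what is proved, stated in full; the proofs are below) =====
def Claim_equal_convert_predictions_py : Prop := ∀ (Y_pred : List (List String)) (test_tokens : List String) (test_segments : List (String × String)), Dom_convert_predictions_py Y_pred test_tokens test_segments → Spec_convert_predictions_py Y_pred test_tokens test_segments (convert_predictions_py Y_pred test_tokens test_segments)

-- ===== LEMMAS AND PROOFS =====

-- A's flat per-token string as a structural recursion over the zipped pairs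
def aflat : List (Char × String) → List Char
  | [] => []
  | cl :: r => cl.1 :: (if cl.2 == "E" || cl.2 == "S" then '-' :: aflat r else aflat r)

theorem foldl_aflat (l : List (Char × String)) (acc : List Char) :
    l.foldl (fun seg cl =>
      let seg' := seg ++ [cl.1]
      if cl.2 == "E" || cl.2 == "S" then seg' ++ ['-'] else seg') acc = acc ++ aflat l := by
  induction l generalizing acc with
  | nil => simp [aflat]
  | cons cl r ih =>
    simp only [List.foldl_cons, aflat]
    by_cases h : (cl.2 == "E" || cl.2 == "S") = true
    · rw [if_pos h, ih, if_pos h]; simp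
    · rw [if_neg h, ih, if_neg h]; simp

-- B's pieces: consecutive slices of cs at the given bounds
def piecesOf (cs : List Char) (bs : List Nat) : List (List Char) :=
  (bs.zip bs.tail).map (fun ab => (cs.drop ab.1).take (ab.2 - ab.1))

theorem piecesOf_cons (cs : List Char) (a b : Nat) (bs : List Nat) :
    piecesOf cs (a :: b :: bs) = ((cs.drop a).take (b - a)) :: piecesOf cs (b :: bs) := by
  simp [piecesOf]

theorem piecesOf_shift (c : Char) (cs : List Char) (bs : List Nat) :
    piecesOf (c :: cs) (bs.map (fun i => i + 1)) = piecesOf cs bs := by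
  unfold piecesOf
  cases bs with
  | nil => rfl
  | cons a bs' =>
    induction bs' generalizing a with
    | nil => rfl
    | cons b r ih => simp_all [List.drop_succ_cons]

-- B's cut indices
def cutsOf (pl : List String) (n : Nat) : List Nat :=
  ((List.range n).filter (fun i => pl.getD i "" == "E" || pl.getD i "" == "S")).map (fun i => i + 1)

theorem cutsOf_cons (lab : String) (pl : List String) (n : Nat) :
    cutsOf (lab :: pl) (n + 1) =
      (if lab == "E" || lab == "S" then [1] else []) ++ (cutsOf pl n).map (fun i => i + 1) := by
  unfold cutsOf
  rw [List.range_succ_eq_map, List.filter_cons]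
  by_cases h : (lab == "E" || lab == "S") = true
  · simp only [List.getD_cons_zero, h, if_pos]
    rw [List.filter_map]
    simp [Function.comp_def, List.map_map]
  · simp only [List.getD_cons_zero, h]
    rw [List.filter_map]
    simp [Function.comp_def, List.map_map]

theorem join_cons_head (sep p0 : List Char) (c : Char) (rest : List (List Char)) :
    PySem.Chars.join sep ((c :: p0) :: rest) = c :: PySem.Chars.join sep (p0 :: rest) := by
  cases rest with
  | nil => simp [PySem.Chars.join_singleton]
  | cons q r => rw [PySem.Chars.join_cons_cons, PySem.Chars.join_cons_cons]; simp

-- the core per-token identity: joined boundary slices = A's flat string (before rstrip)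
theorem join_pieces_eq_aflat (cs : List Char) (pl : List String) :
    PySem.Chars.join ['-'] (piecesOf cs (0 :: (cutsOf pl (min cs.length pl.length) ++ [min cs.length pl.length])))
      = aflat (cs.zip pl) := by
  induction cs generalizing pl with
  | nil =>
    simp only [List.length_nil, Nat.zero_min, List.zip_nil_left, aflat]
    simp [cutsOf, piecesOf, PySem.Chars.join_singleton]
  | cons c cs' ih =>
    cases pl with
    | nil => simp [cutsOf, piecesOf, PySem.Chars.join_singleton, aflat]
    | cons lab pl' =>
      have hmin : min (c :: cs').length (lab :: pl').length = min cs'.length pl'.length + 1 := by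
        simp [Nat.succ_min_succ]
      rw [hmin, cutsOf_cons]
      set n' := min cs'.length pl'.length with hn'
      have hzip : (c :: cs').zip (lab :: pl') = (c, lab) :: cs'.zip pl' := rfl
      rw [hzip]
      obtain ⟨b, bs', hbs⟩ : ∃ b bs', cutsOf pl' n' ++ [n'] = b :: bs' := by
        cases hcc : cutsOf pl' n' with
        | nil => exact ⟨n', [], by simp⟩
        | cons x xs => exact ⟨x, xs ++ [n'], by simp⟩
      by_cases h : (lab == "E" || lab == "S") = true
      · rw [if_pos h]
        have hpl : piecesOf (c :: cs') (0 :: ([1] ++ ((cutsOf pl' n').map (fun i => i + 1) ++ [n' + 1])))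
            = [c] :: piecesOf cs' (0 :: (cutsOf pl' n' ++ [n'])) := by
          rw [List.singleton_append, piecesOf_cons,
            show (1 : Nat) :: ((cutsOf pl' n').map (fun i => i + 1) ++ [n' + 1])
              = ((0 : Nat) :: (cutsOf pl' n' ++ [n'])).map (fun i => i + 1) from by simp,
            piecesOf_shift]
          rfl
        rw [List.append_assoc, hpl, hbs, piecesOf_cons, PySem.Chars.join_cons_cons, ← piecesOf_cons, ← hbs, ih]
        simp [aflat, h]
      · rw [if_neg h, List.nil_append]
        have hmap : (cutsOf pl' n').map (fun i => i + 1) ++ [n' + 1]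
            = (b + 1) :: bs'.map (fun i => i + 1) := by
          rw [show (cutsOf pl' n').map (fun i => i + 1) ++ [n' + 1]
              = (cutsOf pl' n' ++ [n']).map (fun i => i + 1) from by simp, hbs]
          rfl
        rw [hmap, piecesOf_cons,
          show ((b + 1) :: bs'.map (fun i => i + 1)) = ((b :: bs').map (fun i => i + 1)) from rfl,
          piecesOf_shift]
        have hfirst : ((c :: cs').drop 0).take (b + 1 - 0) = c :: (cs'.drop 0).take (b - 0) := by
          simp
        rw [hfirst, join_cons_head, ← piecesOf_cons, ← hbs, ih]
        simp [aflat, h]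

-- per-token equality of the two renderings (the B side written via piecesOf/cutsOf,
-- which unfold definitionally to the port's inline comprehensions)
theorem token_eq (t : String) (pl : List String) :
    String.ofList (pyRstripDash ((t.toList.zip pl).foldl (fun seg cl =>
      let seg' := seg ++ [cl.1]
      if cl.2 == "E" || cl.2 == "S" then seg' ++ ['-'] else seg') []))
    = String.ofList (pyRstripDash (PySem.Chars.join ['-']
        (piecesOf t.toList (0 :: (cutsOf pl (min t.toList.length pl.length) ++ [min t.toList.length pl.length]))))) := by
  rw [foldl_aflat, List.nil_append, join_pieces_eq_aflat]

-- ===== VERDICT =====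
theorem convert_predictions_py_spec : Claim_equal_convert_predictions_py := by
  intro Y_pred test_tokens test_segments _
  unfold Spec_convert_predictions_py convert_predictions_py convert_predictions_py_alt
  simp only
  refine congrArg₂ Prod.mk ?_ rfl
  induction (test_tokens.zip Y_pred) using List.reverseRecOn with
  | nil => simp only [List.foldl_nil]
  | append_singleton l tp ih =>
    simp only [List.foldl_append, List.foldl_cons, List.foldl_nil, ih]
    exact congrArg (fun s => _ ++ [s]) (token_eq tp.1 tp.2)
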